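-- pv_equiv track=rewrite | github.com/glav/teambot | src/teambot/history/compactor.py | _compact_medium
-- ===== SOURCE A (Python) =====
-- def _compact_medium(content: str) -> str:
--     """Medium compaction - keep only headers and summaries."""
--     lines = content.split("\n")
--     result = []
--     keep_next_lines = 0
--
--     for line in lines:
--         # Keep all headers
--         if line.startswith("#"):
--             result.append(line)
--             keep_next_lines = 2  # Keep a couple lines after headers
--         elif keep_next_lines > 0:
--             if line.strip():  # Only non-empty lines
--                 result.append(line)
--                 keep_next_lines -= 1
--
--     return "\n".join(result)
-- ===== SOURCE B (Python) =====
-- def _compact_medium(content: str) -> str: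
--     """Medium compaction - keep only headers and summaries."""
--     lines = content.split("\n")
--     result = []
--     i = 0
--     n = len(lines)
--     while i < n:
--         line = lines[i]
--         i += 1
--         if not line.startswith("#"):
--             continue
--         # anchor: a header; gather up to 2 non-empty lines until the next header
--         result.append(line)
--         kept = 0
--         while i < n and kept < 2 and not lines[i].startswith("#"):
--             if lines[i].strip():
--                 result.append(lines[i])
--                 kept += 1
--             i += 1
--     return "\n".join(result)
-- ===== Notes on version B (the rewrite author's own statement) =====
-- stated objective: alternative
-- what changed: Replaces A's single flat pass with a countdown state variable by an anchor-then-gather decomposition: an outer scan that only looks for header lines and, per header, an inner forward scan that collects up to two non-empty lines and stops at the next header.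
import Mathlib
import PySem

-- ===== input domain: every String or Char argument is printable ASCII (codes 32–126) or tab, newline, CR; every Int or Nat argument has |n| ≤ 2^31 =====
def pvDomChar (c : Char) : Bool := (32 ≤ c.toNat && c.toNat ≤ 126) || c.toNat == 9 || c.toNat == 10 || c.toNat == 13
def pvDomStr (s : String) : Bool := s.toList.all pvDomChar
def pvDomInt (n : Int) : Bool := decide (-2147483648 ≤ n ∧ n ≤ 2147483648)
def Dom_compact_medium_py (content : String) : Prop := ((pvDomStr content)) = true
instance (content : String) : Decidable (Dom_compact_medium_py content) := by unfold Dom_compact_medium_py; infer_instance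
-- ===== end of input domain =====

-- B replaces A's flat counter pass by an anchor-then-gather decomposition (same result, same cost).

-- ===== PORT A =====
-- literal transliteration of A's single for-loop with state (result, keep_next_lines)
def compactAStep (st : List String × Nat) (line : String) : List String × Nat :=
  if PySem.Str.startswith line "#" then (st.1 ++ [line], 2)
  else if st.2 > 0 then
    if PySem.Str.strip line ≠ "" then (st.1 ++ [line], st.2 - 1) else st
  else st

def compact_medium_py (content : String) : String :=
  let lines := (PySem.Str.split? content "\n").getD []  -- sep is the non-empty literal "\n", so split? is always some
  PySem.Str.join "\n" (lines.foldl compactAStep ([], 0)).1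

-- ===== PORT B =====
-- inner while loop of Source B: gather up to 2 non-empty lines, stopping at the next header;
-- returns (collected lines, remaining lines)
def gatherB : List String → Nat → List String × List String
  | [], _ => ([], [])
  | l :: ls, kept =>
    if kept < 2 ∧ ¬ (PySem.Str.startswith l "#" = true) then
      if PySem.Str.strip l ≠ "" then
        let p := gatherB ls (kept + 1); (l :: p.1, p.2)
      else gatherB ls kept
    else ([], l :: ls)

theorem gatherB_snd_length : ∀ (ls : List String) (kept : Nat), (gatherB ls kept).2.length ≤ ls.length := by
  intro ls
  induction ls with
  | nil => intro kept; simp [gatherB]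
  | cons l ls ih =>
    intro kept
    simp only [gatherB]
    split_ifs with h1 h2
    · exact Nat.le_succ_of_le (ih (kept + 1))
    · exact Nat.le_succ_of_le (ih kept)
    · simp

-- outer while loop of Source B: scan for header lines, emit each and the gathered lines after it
def outerB : List String → List String
  | [] => []
  | l :: ls =>
    if PySem.Str.startswith l "#" then
      let p := gatherB ls 0
      l :: (p.1 ++ outerB p.2)
    else outerB ls
  termination_by ls => ls.length
  decreasing_by
  · exact Nat.lt_succ_of_le (gatherB_snd_length ls 0)
  · simp

def compact_medium_py_alt (content : String) : String :=
  let lines := (PySem.Str.split? content "\n").getD []  -- sep is the non-empty literal "\n", so split? is always some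
  PySem.Str.join "\n" (outerB lines)

-- ===== PRECONDITION & SPEC =====
def Spec_compact_medium_py (content : String) (out : String) : Prop := out = compact_medium_py_alt content
instance (content : String) (out : String) : Decidable (Spec_compact_medium_py content out) := by unfold Spec_compact_medium_py; infer_instance

-- ===== CLAIM (what is proved, stated in full; the proofs are below) =====
def Claim_equal_compact_medium_py : Prop := ∀ (content : String), Dom_compact_medium_py content → Spec_compact_medium_py content (compact_medium_py content)

-- ===== LEMMAS AND PROOFS =====

-- with the budget exhausted the gather step is a no-op
theorem gatherB_two (ls : List String) :
    (gatherB ls 2).1 ++ outerB (gatherB ls 2).2 = outerB ls := by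
  cases ls <;> simp [gatherB, outerB]

-- A's fold with remaining budget k = 2 - kept equals B's gather-then-outer continuation
theorem foldA_eq_outerB : ∀ (ls : List String) (acc : List String) (kept : Nat), kept ≤ 2 →
    (ls.foldl compactAStep (acc, 2 - kept)).1
      = acc ++ (gatherB ls kept).1 ++ outerB (gatherB ls kept).2 := by
  intro ls
  induction ls with
  | nil => intro acc kept _; simp [gatherB, outerB]
  | cons l ls ih =>
    intro acc kept hk
    by_cases hh : PySem.Chars.startswith l.toList ['#'] = true
    · -- header line
      have hstep : compactAStep (acc, 2 - kept) l = (acc ++ [l], 2) := by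
        simp [compactAStep, hh]
      have h := ih (acc ++ [l]) 0 (by omega)
      simp only [Nat.sub_zero] at h
      rw [List.foldl_cons, hstep, h]
      have hg : gatherB (l :: ls) kept = ([], l :: ls) := by
        by_cases h2 : kept < 2 <;> simp [gatherB, hh, h2]
      rw [hg]
      simp [outerB, hh]
    · have hh' : PySem.Chars.startswith l.toList ['#'] = false := by simpa using hh
      by_cases h2 : kept < 2
      · have hkpos : 0 < 2 - kept := by omega
        by_cases hs : PySem.Str.strip l ≠ ""
        · -- non-header, budget left, non-blank: kept
          have he : 2 - kept - 1 = 2 - (kept + 1) := by omega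
          have hstep : compactAStep (acc, 2 - kept) l = (acc ++ [l], 2 - (kept + 1)) := by
            simp [compactAStep, hh', hkpos, hs, he]
          rw [List.foldl_cons, hstep, ih (acc ++ [l]) (kept + 1) (by omega)]
          simp [gatherB, hh', h2, hs]
        · -- non-header, budget left, blank: skipped, budget unchanged
          have hstep : compactAStep (acc, 2 - kept) l = (acc, 2 - kept) := by
            simp [compactAStep, hh', hkpos, hs]
          rw [List.foldl_cons, hstep, ih acc kept hk]
          simp [gatherB, hh', h2, hs]
      · -- budget exhausted (kept = 2): line dropped
        have hk2 : kept = 2 := by omega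
        subst hk2
        have hstep : compactAStep (acc, 2 - 2) l = (acc, 2 - 2) := by
          simp [compactAStep, hh']
        rw [List.foldl_cons, hstep, ih acc 2 (by omega)]
        have hg : gatherB (l :: ls) 2 = ([], l :: ls) := by simp [gatherB]
        rw [hg, List.append_assoc, gatherB_two]
        simp [outerB, hh']

theorem foldA_eq_outerB_main (ls : List String) :
    (ls.foldl compactAStep ([], 0)).1 = outerB ls := by
  have h := foldA_eq_outerB ls [] 2 (by omega)
  simp only [Nat.sub_self] at h
  rw [h, List.nil_append, gatherB_two]

-- ===== VERDICT (by name: the statement is the Claim_ definition above) =====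
theorem compact_medium_py_spec : Claim_equal_compact_medium_py := by
  intro content _
  unfold Spec_compact_medium_py compact_medium_py compact_medium_py_alt
  simp only [foldA_eq_outerB_main]
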